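-- pv_equiv track=rewrite | github.com/jujuwon/Algorithm | programmers/PRO142085.py | solution
-- ===== SOURCE A (Python) =====
-- import heapq
--
-- def solution(n, k, enemy):
--
--     if len(enemy) <= k:
--         return len(enemy)
--
--     hq = []
--     for idx in range(k):
--         heapq.heappush(hq, enemy[idx])
--     round = k
--
--     for idx in range(k, len(enemy)):
--         heapq.heappush(hq, enemy[idx])
--         e = heapq.heappop(hq)
--         if n < e:
--             return round
--         n -= e
--         round += 1
--
--     return len(enemy)
-- ===== SOURCE B (Python) =====
-- def solution(n, k, enemy):
--     # Binary search for the largest number of rounds r that is survivable: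
--     # r <= k rounds always are; otherwise the cheapest way to pass the first r
--     # waves uses the k tickets on the k largest of them and pays the rest.
--     def survivable(r):
--         if r <= k:
--             return True
--         front = sorted(enemy[:r], reverse=True)
--         return sum(front) - sum(front[:k]) <= n
--
--     lo, hi = 0, len(enemy)
--     while lo < hi:
--         mid = (lo + hi + 1) // 2
--         if survivable(mid):
--             lo = mid
--         else:
--             hi = mid - 1
--     return lo
-- ===== Notes on version B (the rewrite author's own statement) =====
-- stated objective: alternative
-- what changed: Replaces the incremental heap simulation with a binary search on the monotone predicate 'r rounds are survivable', where the cost of r rounds is recomputed from scratch as sum of the first r enemies minus the k largest of them.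
-- outside the precondition, e.g. on solution(5, -1, [3, 2]): A returns 1, B returns 2; on solution(-4, 0, [-1, -5, -4, -4, 7]): A returns 0, B returns 5
import Mathlib
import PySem

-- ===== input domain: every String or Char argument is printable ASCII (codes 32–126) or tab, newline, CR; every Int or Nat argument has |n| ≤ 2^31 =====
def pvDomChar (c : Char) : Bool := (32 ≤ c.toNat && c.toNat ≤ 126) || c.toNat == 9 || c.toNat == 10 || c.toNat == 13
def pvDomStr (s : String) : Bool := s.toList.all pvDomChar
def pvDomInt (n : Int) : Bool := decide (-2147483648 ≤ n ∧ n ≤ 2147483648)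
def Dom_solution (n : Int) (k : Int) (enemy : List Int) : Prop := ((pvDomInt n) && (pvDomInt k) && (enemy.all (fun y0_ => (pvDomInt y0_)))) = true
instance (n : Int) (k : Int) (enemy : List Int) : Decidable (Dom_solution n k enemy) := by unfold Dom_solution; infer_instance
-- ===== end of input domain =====

-- B replaces A's incremental heap simulation by a binary search on the monotone
-- predicate "r rounds are survivable" (alternative algorithm, similar cost).

-- ===== PORT A =====
-- The heapq heap of ints is rendered as a sorted list: heappush = ordered insert,
-- heappop = take the head (the minimum) — exact for the values A reads off the heap.
def heapPush (hq : List Int) (x : Int) : List Int :=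
  match hq with
  | [] => [x]
  | y :: ys => if x ≤ y then x :: y :: ys else y :: heapPush ys x

-- the second for-loop of A: state (hq, n, round)
def solutionLoop (rest : List Int) (hq : List Int) (n : Int) (round : Int) (total : Int) : Int :=
  match rest with
  | [] => total
  | x :: xs =>
    match heapPush hq x with
    | [] => total  -- unreachable: heapPush never returns []
    | e :: hq' => if n < e then round else solutionLoop xs hq' (n - e) (round + 1) total

def solution (n : Int) (k : Int) (enemy : List Int) : Int :=
  if (enemy.length : Int) ≤ k then (enemy.length : Int)
  else
    -- for idx in range(k): heappush(hq, enemy[idx])  (0 ≤ k < len under Pre_)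
    solutionLoop (enemy.drop k.toNat) ((enemy.take k.toNat).foldl heapPush []) n k (enemy.length : Int)

-- ===== PORT B =====
def survivable (n : Int) (k : Int) (enemy : List Int) (r : Int) : Bool :=
  if r ≤ k then true
  else
    let front := PySem.List.sorted (PySem.List.slice enemy none (some r)) (fun x => x) true
    decide (front.sum - (PySem.List.slice front none (some k)).sum ≤ n)

def bsearch (n : Int) (k : Int) (enemy : List Int) (lo hi : Int) : Int :=
  if h : lo < hi then
    let mid := PySem.Int.floordiv (lo + hi + 1) 2
    if survivable n k enemy mid then bsearch n k enemy mid hi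
    else bsearch n k enemy lo (mid - 1)
  else lo
termination_by (hi - lo).toNat
decreasing_by
  · have hb := PySem.Int.floordiv_two_mid_bounds (lo := lo + 1) (hi := hi) (by omega)
    have he : lo + 1 + hi = lo + hi + 1 := by ring
    rw [he] at hb
    simp only [mid] at *
    omega
  · have hb := PySem.Int.floordiv_two_mid_bounds (lo := lo + 1) (hi := hi) (by omega)
    have he : lo + 1 + hi = lo + hi + 1 := by ring
    rw [he] at hb
    simp only [mid] at *
    omega

def solution_alt (n : Int) (k : Int) (enemy : List Int) : Int :=
  bsearch n k enemy 0 (enemy.length : Int)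

-- ===== PRECONDITION & SPEC =====
-- Pre_ restricts to the problem's natural domain (a non-negative ticket count k and
-- non-negative enemy counts): for k < 0 A's range(k, len) indexes enemy with negative
-- wraparound, and for negative enemy values A's greedy is not the round maximum either.
def Pre_solution (n : Int) (k : Int) (enemy : List Int) : Prop :=
  0 ≤ k ∧ ∀ e ∈ enemy, 0 ≤ e
instance (n : Int) (k : Int) (enemy : List Int) : Decidable (Pre_solution n k enemy) := by
  unfold Pre_solution; infer_instance

def pvWitness_solution : Int × Int × List Int := (10, 2, [4, 2, 4, 8, 3, 3])

def Spec_solution (n : Int) (k : Int) (enemy : List Int) (out : Int) : Prop := out = solution_alt n k enemy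
instance (n : Int) (k : Int) (enemy : List Int) (out : Int) : Decidable (Spec_solution n k enemy out) := by unfold Spec_solution; infer_instance

-- ===== CLAIM (what is proved, stated in full; the proofs are below) =====
def Claim_equal_solution : Prop := ∀ (n : Int) (k : Int) (enemy : List Int), Dom_solution n k enemy → Pre_solution n k enemy → Spec_solution n k enemy (solution n k enemy)

-- ===== LEMMAS AND PROOFS =====

-- sorted prefix of the first r enemies (insertion sort by heapPush)
def sortP (enemy : List Int) (r : Nat) : List Int := (enemy.take r).foldl heapPush []
-- cost of surviving r rounds with k tickets: sum of the (r-k) smallest of the first r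
def costP (enemy : List Int) (k : Int) (r : Nat) : Int := ((sortP enemy r).take (r - k.toNat)).sum
def survN (n : Int) (k : Int) (enemy : List Int) (r : Nat) : Bool :=
  decide ((r : Int) ≤ k) || decide (costP enemy k r ≤ n)

lemma heapPush_perm (l : List Int) (x : Int) : (heapPush l x).Perm (x :: l) := by
  induction l with
  | nil => simp [heapPush]
  | cons y ys ih =>
    simp only [heapPush]
    split
    · exact List.Perm.refl _
    · exact (ih.cons y).trans (List.Perm.swap x y ys)

lemma mem_heapPush (l : List Int) (x z : Int) : z ∈ heapPush l x ↔ z = x ∨ z ∈ l := by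
  rw [(heapPush_perm l x).mem_iff, List.mem_cons]

lemma heapPush_sorted (l : List Int) (x : Int) (h : l.Pairwise (· ≤ ·)) :
    (heapPush l x).Pairwise (· ≤ ·) := by
  induction l with
  | nil => simp [heapPush]
  | cons y ys ih =>
    obtain ⟨hy, ht⟩ := List.pairwise_cons.mp h
    simp only [heapPush]
    split
    · refine List.pairwise_cons.mpr ⟨?_, h⟩
      intro z hz
      rcases List.mem_cons.mp hz with rfl | hz
      · assumption
      · exact le_trans (by assumption) (hy z hz)
    · refine List.pairwise_cons.mpr ⟨?_, ih ht⟩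
      intro z hz
      rcases (mem_heapPush ys x z).mp hz with rfl | hz
      · omega
      · exact hy z hz

lemma foldl_heapPush_perm : ∀ (l acc : List Int), (l.foldl heapPush acc).Perm (acc ++ l) := by
  intro l
  induction l with
  | nil => simp
  | cons x xs ih =>
    intro acc
    exact (ih (heapPush acc x)).trans
      (((heapPush_perm acc x).append_right xs).trans List.perm_middle.symm)

lemma sortP_perm (enemy : List Int) (r : Nat) : (sortP enemy r).Perm (enemy.take r) := by
  simpa using foldl_heapPush_perm (enemy.take r) []

lemma foldl_heapPush_sorted : ∀ (l acc : List Int), acc.Pairwise (· ≤ ·) →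
    (l.foldl heapPush acc).Pairwise (· ≤ ·) := by
  intro l
  induction l with
  | nil => exact fun acc h => h
  | cons x xs ih => exact fun acc h => ih _ (heapPush_sorted acc x h)

lemma sortP_sorted (enemy : List Int) (r : Nat) : (sortP enemy r).Pairwise (· ≤ ·) := by
  exact foldl_heapPush_sorted _ [] List.Pairwise.nil

-- THE STEP LEMMA: pushing x into the top part (drop m) of a sorted list and popping
-- the minimum yields the top part (drop (m+1)) of the sorted list with x inserted,
-- and the popped element accounts for the growth of the bottom-part sum.
lemma heapPush_drop (x : Int) (m : Nat) :
    ∀ (s : List Int), s.Pairwise (· ≤ ·) →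
    ∃ e, heapPush (s.drop m) x = e :: (heapPush s x).drop (m + 1)
      ∧ ((heapPush s x).take (m + 1)).sum = (s.take m).sum + e
      ∧ (e = x ∨ e ∈ s) := by
  induction m with
  | zero =>
    intro s _
    cases s with
    | nil => exact ⟨x, by simp [heapPush], by simp [heapPush], Or.inl rfl⟩
    | cons y t =>
      by_cases hxy : x ≤ y
      · exact ⟨x, by simp [heapPush, hxy], by simp [heapPush, hxy], Or.inl rfl⟩
      · exact ⟨y, by simp [heapPush, hxy], by simp [heapPush, hxy],
          Or.inr (List.mem_cons_self ..)⟩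
  | succ m ih =>
    intro s hs
    cases s with
    | nil => exact ⟨x, by simp [heapPush], by simp [heapPush], Or.inl rfl⟩
    | cons y t =>
      obtain ⟨hy, ht⟩ := List.pairwise_cons.mp hs
      by_cases hxy : x ≤ y
      · refine ⟨x, ?_, ?_, Or.inl rfl⟩
        · have hpt : heapPush (t.drop m) x = x :: t.drop m := by
            cases hdt : t.drop m with
            | nil => simp [heapPush]
            | cons z zs =>
              have hz : z ∈ t :=
                List.mem_of_mem_drop (by rw [hdt]; exact List.mem_cons_self ..)
              simp [heapPush, le_trans hxy (hy z hz)]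
          simpa [heapPush, hxy] using hpt
        · simp [heapPush, hxy, List.take_succ_cons]
          omega
      · obtain ⟨e, h1, h2, h3⟩ := ih t ht
        refine ⟨e, ?_, ?_, ?_⟩
        · simpa [heapPush, hxy] using h1
        · simp [heapPush, hxy, List.take_succ_cons]
          omega
        · rcases h3 with h | h
          · exact Or.inl h
          · exact Or.inr (List.mem_cons_of_mem y h)

lemma sortP_succ (enemy : List Int) (r : Nat) (hr : r < enemy.length) :
    sortP enemy (r + 1) = heapPush (sortP enemy r) (enemy[r]) := by
  unfold sortP
  rw [List.take_add_one, List.getElem?_eq_getElem hr, Option.toList_some, List.foldl_append]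
  simp

-- cost recurrence packaged for the loop
lemma cost_step (enemy : List Int) (k : Int) (r : Nat) (hk : 0 ≤ k)
    (hkr : k.toNat ≤ r) (hr : r < enemy.length) :
    ∃ e, heapPush ((sortP enemy r).drop (r - k.toNat)) (enemy[r])
           = e :: (sortP enemy (r + 1)).drop (r + 1 - k.toNat)
      ∧ costP enemy k (r + 1) = costP enemy k r + e
      ∧ (e = enemy[r] ∨ e ∈ sortP enemy r) := by
  obtain ⟨e, h1, h2, h3⟩ := heapPush_drop (enemy[r]) (r - k.toNat) (sortP enemy r)
    (sortP_sorted enemy r)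
  have hm : r - k.toNat + 1 = r + 1 - k.toNat := by omega
  refine ⟨e, ?_, ?_, h3⟩
  · rw [h1, sortP_succ enemy r hr, hm]
  · unfold costP
    rw [sortP_succ enemy r hr, ← hm, h2]

lemma cost_mono (n : Int) (k : Int) (enemy : List Int) (hk : 0 ≤ k)
    (hpos : ∀ e ∈ enemy, 0 ≤ e) :
    ∀ r₁ r₂ : Nat, k.toNat ≤ r₁ → r₁ ≤ r₂ → r₂ ≤ enemy.length →
    costP enemy k r₁ ≤ costP enemy k r₂ := by
  have step : ∀ r : Nat, k.toNat ≤ r → r < enemy.length →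
      costP enemy k r ≤ costP enemy k (r + 1) := by
    intro r hkr hr
    obtain ⟨e, _, h2, h3⟩ := cost_step enemy k r hk hkr hr
    have he : 0 ≤ e := by
      rcases h3 with rfl | h
      · exact hpos _ (List.getElem_mem hr)
      · exact hpos _ (List.mem_of_mem_take ((sortP_perm enemy r).mem_iff.mp h))
    omega
  intro r₁ r₂ h1 h12 h2
  induction r₂ with
  | zero => interval_cases r₁; exact le_refl _
  | succ m ihm =>
    rcases Nat.lt_or_ge m r₁ with hlt | hge
    · have : r₁ = m + 1 := by omega
      subst this; exact le_refl _
    · exact le_trans (ihm hge (by omega)) (step m (by omega) (by omega))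

lemma survN_up (n : Int) (k : Int) (enemy : List Int) (hk : 0 ≤ k)
    (hpos : ∀ e ∈ enemy, 0 ≤ e) (r r' : Nat)
    (h : survN n k enemy r = false) (hrr : r ≤ r') (hr' : r' ≤ enemy.length) :
    survN n k enemy r' = false := by
  simp only [survN, Bool.or_eq_false_iff, decide_eq_false_iff_not, not_le] at h ⊢
  obtain ⟨hkr, hcr⟩ := h
  have hkn : k.toNat ≤ r := by omega
  have := cost_mono n k enemy hk hpos r r' hkn hrr hr'
  constructor
  · omega
  · omega

-- A's loop computes the greatest survivable round count
lemma solutionLoop_cons (x : Int) (xs hq : List Int) (n round total e : Int)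
    (hq' : List Int) (h : heapPush hq x = e :: hq') :
    solutionLoop (x :: xs) hq n round total
      = if n < e then round else solutionLoop xs hq' (n - e) (round + 1) total := by
  simp only [solutionLoop, h]

lemma loopA_eq (n : Int) (k : Int) (enemy : List Int) (hk : 0 ≤ k)
    (hpos : ∀ e ∈ enemy, 0 ≤ e) :
    ∀ (d r : Nat), enemy.length - r ≤ d → k.toNat ≤ r → r ≤ enemy.length →
    (∀ r', r' ≤ r → survN n k enemy r' = true) →
    solutionLoop (enemy.drop r) ((sortP enemy r).drop (r - k.toNat))
        (n - costP enemy k r) (r : Int) (enemy.length : Int)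
      = (Nat.findGreatest (fun r' => survN n k enemy r' = true) enemy.length : Int) := by
  intro d
  induction d with
  | zero =>
    intro r hd hkr hrl hall
    have hrl' : r = enemy.length := by omega
    subst hrl'
    rw [List.drop_length]
    simp only [solutionLoop]
    have hfg : Nat.findGreatest (fun r' => survN n k enemy r' = true) enemy.length
        = enemy.length := by
      rw [Nat.findGreatest_eq_iff]
      exact ⟨le_refl _, fun _ => hall _ (le_refl _), fun b hb hb' => by omega⟩
    rw [hfg]
  | succ d ihd =>
    intro r hd hkr hrl hall
    rcases Nat.lt_or_ge r enemy.length with hr | hr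
    · rw [List.drop_eq_getElem_cons hr]
      obtain ⟨e, h1, h2, h3⟩ := cost_step enemy k r hk hkr hr
      rw [solutionLoop_cons _ _ _ _ _ _ e _ h1]
      split_ifs with hne
      · have hfail : survN n k enemy (r + 1) = false := by
          simp only [survN, Bool.or_eq_false_iff, decide_eq_false_iff_not, not_le]
          constructor
          · push_cast; omega
          · omega
        have hfg : Nat.findGreatest (fun r' => survN n k enemy r' = true) enemy.length
            = r := by
          rw [Nat.findGreatest_eq_iff]
          refine ⟨by omega, fun _ => hall _ (le_refl _), ?_⟩
          intro b hb hbl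
          rw [survN_up n k enemy hk hpos (r + 1) b hfail (by omega) hbl]
          simp
        rw [hfg]
      · have hsucc : survN n k enemy (r + 1) = true := by
          simp only [survN, Bool.or_eq_true, decide_eq_true_eq]
          right; omega
        have hrec := ihd (r + 1) (by omega) (by omega) (by omega) (fun r' hr' => by
          rcases Nat.lt_or_ge r' (r + 1) with h' | h'
          · exact hall r' (by omega)
          · have hr'' : r' = r + 1 := by omega
            subst hr''; exact hsucc)
        have hn : n - costP enemy k r - e = n - costP enemy k (r + 1) := by omega
        have hr1 : (r : Int) + 1 = ((r + 1 : Nat) : Int) := by push_cast; ring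
        rw [hn, hr1]
        exact hrec
    · have hrl' : r = enemy.length := by omega
      subst hrl'
      rw [List.drop_length]
      simp only [solutionLoop]
      have hfg : Nat.findGreatest (fun r' => survN n k enemy r' = true) enemy.length
          = enemy.length := by
        rw [Nat.findGreatest_eq_iff]
        exact ⟨le_refl _, fun _ => hall _ (le_refl _), fun b hb hb' => by omega⟩
      rw [hfg]

lemma solution_eq_findGreatest (n : Int) (k : Int) (enemy : List Int) (hk : 0 ≤ k)
    (hpos : ∀ e ∈ enemy, 0 ≤ e) :
    solution n k enemy
      = (Nat.findGreatest (fun r' => survN n k enemy r' = true) enemy.length : Int) := by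
  unfold solution
  split_ifs with hlen
  · have hfg : Nat.findGreatest (fun r' => survN n k enemy r' = true) enemy.length
        = enemy.length := by
      rw [Nat.findGreatest_eq_iff]
      refine ⟨le_refl _, fun _ => ?_, fun b hb hbl => by omega⟩
      simp only [survN, Bool.or_eq_true, decide_eq_true_eq]
      left; exact hlen
    rw [hfg]
  · have hkl : k.toNat ≤ enemy.length := by omega
    have hthis := loopA_eq n k enemy hk hpos enemy.length k.toNat (by omega) (le_refl _)
      hkl (fun r' hr' => by
        simp only [survN, Bool.or_eq_true, decide_eq_true_eq]
        left; omega)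
    have hc : n - costP enemy k k.toNat = n := by
      unfold costP; simp
    have hk' : (k.toNat : Int) = k := Int.toNat_of_nonneg hk
    rw [hc, hk'] at hthis
    rw [Nat.sub_self] at hthis
    rw [List.drop_zero] at hthis
    unfold sortP at hthis
    exact hthis

-- B's survivable agrees with survN
lemma survivable_eq (n : Int) (k : Int) (enemy : List Int) (hk : 0 ≤ k)
    (r : Nat) (hr : r ≤ enemy.length) :
    survivable n k enemy (r : Int) = survN n k enemy r := by
  unfold survivable
  split_ifs with hrk
  · symm
    simp only [survN, Bool.or_eq_true, decide_eq_true_eq]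
    left; exact hrk
  · rw [PySem.List.slice_to_natCast enemy r]
    have hlen : (sortP enemy r).length = r := by
      rw [(sortP_perm enemy r).length_eq, List.length_take]; omega
    have hfr : PySem.List.sorted (enemy.take r) (fun x => x) true
        = (sortP enemy r).reverse := by
      apply PySem.List.eq_of_perm_of_pairwise_le_of_injective (fun x : Int => -x)
        (fun a b h => by simpa using h)
      · exact (PySem.List.sorted_perm _ _ _).trans
          ((sortP_perm enemy r).symm.trans (List.reverse_perm _).symm)
      · exact (PySem.List.sorted_pairwise_rev _ _).imp (fun h => by omega)
      · exact List.pairwise_reverse.mpr ((sortP_sorted enemy r).imp (fun h => by omega))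
    rw [hfr]
    simp only [PySem.List.slice_to _ hk]
    have hks : k.toNat < r := by omega
    have htake : (sortP enemy r).reverse.take k.toNat
        = ((sortP enemy r).drop (r - k.toNat)).reverse := by
      rw [List.reverse_drop, hlen]
      congr 1
      omega
    have hsplit := List.sum_take_add_sum_drop (sortP enemy r) (r - k.toNat)
    have hsum : (sortP enemy r).reverse.sum
        - ((sortP enemy r).reverse.take k.toNat).sum = costP enemy k r := by
      rw [htake, List.sum_reverse, List.sum_reverse]
      unfold costP
      omega
    rw [hsum]
    simp only [survN, decide_eq_false (by omega : ¬ ((r : Int) ≤ k)), Bool.false_or]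

lemma bsearch_eq (n : Int) (k : Int) (enemy : List Int) (hk : 0 ≤ k)
    (hpos : ∀ e ∈ enemy, 0 ≤ e) :
    ∀ (fuel : Nat) (lo hi : Int), (hi - lo).toNat ≤ fuel → 0 ≤ lo → lo ≤ hi →
    hi ≤ (enemy.length : Int) →
    survN n k enemy lo.toNat = true →
    (∀ r : Nat, hi < (r : Int) → r ≤ enemy.length → survN n k enemy r = false) →
    bsearch n k enemy lo hi
      = (Nat.findGreatest (fun r' => survN n k enemy r' = true) enemy.length : Int) := by
  intro fuel
  induction fuel with
  | zero =>
    intro lo hi hf h0 hlh hhl hlow hup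
    have hlohi : lo = hi := by omega
    subst hlohi
    rw [bsearch, dif_neg (lt_irrefl lo)]
    have hfg : Nat.findGreatest (fun r' => survN n k enemy r' = true) enemy.length
        = lo.toNat := by
      rw [Nat.findGreatest_eq_iff]
      refine ⟨by omega, fun _ => hlow, ?_⟩
      intro b hb hbl
      rw [hup b (by omega) hbl]
      simp
    rw [hfg]
    omega
  | succ fuel ih =>
    intro lo hi hf h0 hlh hhl hlow hup
    by_cases h : lo < hi
    · rw [bsearch, dif_pos h]
      have hb := PySem.Int.floordiv_two_mid_bounds (lo := lo + 1) (hi := hi) (by omega)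
      have he : lo + 1 + hi = lo + hi + 1 := by ring
      rw [he] at hb
      have hsv : survivable n k enemy (PySem.Int.floordiv (lo + hi + 1) 2)
          = survN n k enemy (PySem.Int.floordiv (lo + hi + 1) 2).toNat := by
        have hmid' : PySem.Int.floordiv (lo + hi + 1) 2
            = (((PySem.Int.floordiv (lo + hi + 1) 2).toNat : Nat) : Int) := by omega
        rw [hmid']
        exact survivable_eq n k enemy hk _ (by omega)
      simp only [hsv]
      split_ifs with hs
      · exact ih (PySem.Int.floordiv (lo + hi + 1) 2) hi (by omega) (by omega) (by omega)
          hhl hs hup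
      · refine ih lo (PySem.Int.floordiv (lo + hi + 1) 2 - 1) (by omega) h0 (by omega)
          (by omega) hlow ?_
        intro b hb1 hb2
        by_cases hcb : hi < (b : Int)
        · exact hup b hcb hb2
        · exact survN_up n k enemy hk hpos (PySem.Int.floordiv (lo + hi + 1) 2).toNat b
            (Bool.eq_false_iff.mpr hs) (by omega) hb2
    · have hlohi : lo = hi := by omega
      subst hlohi
      rw [bsearch, dif_neg (lt_irrefl lo)]
      have hfg : Nat.findGreatest (fun r' => survN n k enemy r' = true) enemy.length
          = lo.toNat := by
        rw [Nat.findGreatest_eq_iff]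
        refine ⟨by omega, fun _ => hlow, ?_⟩
        intro b hb hbl
        rw [hup b (by omega) hbl]
        simp
      rw [hfg]
      omega

lemma solution_alt_eq_findGreatest (n : Int) (k : Int) (enemy : List Int) (hk : 0 ≤ k)
    (hpos : ∀ e ∈ enemy, 0 ≤ e) :
    solution_alt n k enemy
      = (Nat.findGreatest (fun r' => survN n k enemy r' = true) enemy.length : Int) := by
  unfold solution_alt
  refine bsearch_eq n k enemy hk hpos enemy.length 0 (enemy.length : Int) (by omega)
    (le_refl _) (by omega) (le_refl _) ?_ ?_
  · simp only [survN, Bool.or_eq_true, decide_eq_true_eq]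
    left
    simpa using hk
  · intro b hb1 hb2
    omega

-- ===== VERDICT (by name: the statement is the Claim_ definition above) =====
theorem solution_spec : Claim_equal_solution := by
  intro n k enemy _ hpre
  unfold Spec_solution
  rw [solution_eq_findGreatest n k enemy hpre.1 hpre.2,
      solution_alt_eq_findGreatest n k enemy hpre.1 hpre.2]
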